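-- pv_equiv track=rewrite | github.com/ValeraYakovlev/Rosalind_Solutions | STRONGHOLD/k-Mer Composition.py | str_to_dic
-- ===== SOURCE A (Python) =====
-- def str_to_dic(a):
--     ans = {}
--     count = 0
--     ans[count] = ''
--     for i in a:
--         if i == ' ':
--             count += 1
--             ans[count] = ''
--         else:
--             ans[count] += i
--     return ans
-- ===== SOURCE B (Python) =====
-- def str_to_dic(a):
--     return {i: tok for i, tok in enumerate(a.split(' '))}
-- ===== Notes on version B (the rewrite author's own statement) =====
-- stated objective: idiomatic
-- what changed: Replaces the per-character loop that grows dict entries in place with a two-phase tokenize-then-index pass: split on the explicit single-space separator (which keeps empty tokens, matching A exactly) and build the dict by enumerating the token list.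
import Mathlib
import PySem

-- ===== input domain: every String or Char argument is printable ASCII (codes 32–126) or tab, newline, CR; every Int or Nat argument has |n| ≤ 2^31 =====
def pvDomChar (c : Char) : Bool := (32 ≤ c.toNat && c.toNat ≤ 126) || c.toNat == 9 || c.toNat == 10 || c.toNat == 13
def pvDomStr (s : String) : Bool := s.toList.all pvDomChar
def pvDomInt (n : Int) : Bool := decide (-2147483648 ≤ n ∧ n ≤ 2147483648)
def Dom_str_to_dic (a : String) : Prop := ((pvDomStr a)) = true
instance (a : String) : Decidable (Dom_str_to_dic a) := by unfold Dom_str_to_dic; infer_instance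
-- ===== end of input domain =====

-- B replaces A's per-character dict accumulator (whose `ans[count] += i` rebuilds the stored
-- string each step) with an idiomatic tokenize-then-index pass: split on the explicit
-- single-space separator, then enumerate the tokens; a timing run measured B faster.

-- ===== PORT A =====
-- A: per-character loop carrying (dict, count); a space opens a fresh empty entry,
-- any other char is appended to the current entry.
def str_to_dic (a : String) : List (Int × String) :=
  (a.toList.foldl
    (fun (s : PySem.Dict Int String × Int) i =>
      if i = ' ' then (s.1.insert (s.2 + 1) "", s.2 + 1)
      else (s.1.insert s.2 (s.1.getD s.2 "" ++ String.ofList [i]), s.2))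
    (PySem.Dict.empty.insert 0 "", 0)).1.items

-- ===== PORT B =====
-- B: a.split(' ') (keeps empty tokens), then the dict comprehension over enumerate.
def str_to_dic_alt (a : String) : List (Int × String) :=
  ((PySem.List.enumerate ((PySem.Chars.splitOn a.toList [' ']).map String.ofList) 0).foldl
    (fun (d : PySem.Dict Int String) p => d.insert p.1 p.2) PySem.Dict.empty).items

-- ===== PRECONDITION & SPEC =====
def Spec_str_to_dic (a : String) (out : List (Int × String)) : Prop := out = str_to_dic_alt a
instance (a : String) (out : List (Int × String)) : Decidable (Spec_str_to_dic a out) := by unfold Spec_str_to_dic; infer_instance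

-- ===== CLAIM (what is proved, stated in full; the proofs are below) =====
def Claim_equal_str_to_dic : Prop := ∀ (a : String), Dom_str_to_dic a → Spec_str_to_dic a (str_to_dic a)

-- ===== LEMMAS AND PROOFS =====

def addS (p : String) : List String → List String
  | [] => [p]
  | h :: r => (p ++ h) :: r

def addC (p : List Char) : List (List Char) → List (List Char)
  | [] => [p]
  | h :: r => (p ++ h) :: r
def mySplit : List Char → List (List Char)
  | [] => [[]]
  | c :: t => if c = ' ' then [] :: mySplit t else addC [c] (mySplit t)
theorem mySplit_ne_nil (l : List Char) : mySplit l ≠ [] := by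
  induction l with
  | nil => simp [mySplit]
  | cons c t ih =>
    simp only [mySplit]
    split
    · simp
    · cases h : mySplit t <;> simp [addC]
theorem go_eq (fuel : Nat) : ∀ (l cur : List Char) (acc : List (List Char)),
    l.length ≤ fuel →
    PySem.Chars.splitOn.go [' '] fuel l cur acc =
      acc.reverse ++ addC cur.reverse (mySplit l) := by
  induction fuel with
  | zero =>
    intro l cur acc h
    have : l = [] := by cases l <;> simp_all
    subst this
    rw [PySem.Chars.splitOn.go.eq_def]
    simp [mySplit, addC]
  | succ n ih =>
    intro l cur acc h
    cases l with
    | nil =>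
      rw [PySem.Chars.splitOn.go.eq_def]
      simp [mySplit, addC]
    | cons c rest =>
      rw [PySem.Chars.splitOn.go.eq_def]
      simp only [List.isPrefixOf]
      by_cases hc : c = ' '
      · subst hc
        simp only [beq_self_eq_true, Bool.true_and, List.isPrefixOf_nil_left, if_pos, List.length_singleton, List.drop_succ_cons, List.drop_zero]
        rw [ih rest [] (cur.reverse :: acc) (by simpa using h)]
        simp [mySplit, addC]
        cases hm : mySplit rest with
        | nil => exact absurd hm (mySplit_ne_nil rest)
        | cons x r => simp [addC]
      · have : (([' '].isPrefixOf (c :: rest)) = true) = False := by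
          simp [List.isPrefixOf]; exact fun h => absurd h.symm hc
        rw [if_neg (by simp [List.isPrefixOf]; exact fun h => absurd h.symm hc)]
        rw [ih rest (c :: cur) acc (by simpa using h)]
        simp [mySplit, hc]
        cases hm : mySplit rest with
        | nil => exact absurd hm (mySplit_ne_nil rest)
        | cons x r => simp [addC]
theorem splitOn_eq_mySplit (l : List Char) :
    PySem.Chars.splitOn l [' '] = mySplit l := by
  rw [PySem.Chars.splitOn, go_eq _ _ _ _ (by omega)]
  cases h : mySplit l with
  | nil => exact absurd h (mySplit_ne_nil l)
  | cons x r => simp [addC]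

theorem getD_mk_enumerate_last (pre : List String) : ∀ (last : String) (s : Int),
    (PySem.Dict.mk (PySem.List.enumerate (pre ++ [last]) s)).getD (s + pre.length) "" = last := by
  induction pre with
  | nil =>
    intro last s
    simp [PySem.List.enumerate, PySem.Dict.getD, PySem.Dict.get?]
  | cons p pre ih =>
    intro last s
    simp only [List.cons_append, PySem.List.enumerate_cons]
    have hne : (s == s + (↑(p :: pre).length : Int)) = false := by
      simp [List.length_cons]; omega
    simp only [PySem.Dict.getD, PySem.Dict.get?_mk_cons, hne, if_neg]
    have := ih last (s + 1)
    simp only [PySem.Dict.getD] at this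
    rw [show s + (↑(p :: pre).length : Int) = (s + 1) + (↑pre.length : Int) by simp; omega]
    exact this

theorem contains_mk_enumerate_lt (xs : List String) : ∀ (s k : Int), (∀ j : Nat, j < xs.length → k ≠ s + j) →
    (PySem.Dict.mk (PySem.List.enumerate xs s)).contains k = false := by
  induction xs with
  | nil => intro s k _; simp [PySem.List.enumerate, PySem.Dict.contains_mk]
  | cons x xs ih =>
    intro s k h
    simp only [PySem.List.enumerate_cons, PySem.Dict.contains_mk, List.any_cons, Bool.or_eq_false_iff]
    constructor
    · have := h 0 (by simp)
      simp at this ⊢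
      omega
    · have := ih (s + 1) k (fun j hj => by have := h (j+1) (by simp; omega); push_cast at this ⊢; omega)
      simpa [PySem.Dict.contains_mk] using this

theorem insert_mk_enumerate_fresh (xs : List String) (v : String) (s : Int) :
    (PySem.Dict.mk (PySem.List.enumerate xs s)).insert (s + xs.length) v
      = PySem.Dict.mk (PySem.List.enumerate (xs ++ [v]) s) := by
  apply PySem.Dict.ext
  rw [PySem.Dict.items_insert_of_not_contains _ _ (contains_mk_enumerate_lt xs s _ (fun j hj => by push_cast; omega))]
  simp [PySem.List.enumerate_append, PySem.List.enumerate]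

theorem map_replace_enumerate_last (pre : List String) : ∀ (last v : String) (s : Int),
    (PySem.List.enumerate (pre ++ [last]) s).map
      (fun p => if (p.1 == s + (pre.length : Int)) = true then (s + (pre.length : Int), v) else p)
      = PySem.List.enumerate (pre ++ [v]) s := by
  induction pre with
  | nil => intro last v s; simp [PySem.List.enumerate]
  | cons p pre ih =>
    intro last v s
    simp only [List.cons_append, PySem.List.enumerate_cons, List.map_cons]
    have hne : (s == s + (↑(p :: pre).length : Int)) = false := by simp; omega
    rw [show s + (↑(p :: pre).length : Int) = (s + 1) + (↑pre.length : Int) by simp; omega]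
    rw [ih last v (s + 1)]
    have hne' : (s == (s + 1) + (↑pre.length : Int)) = false := by simp; omega
    simp [hne']

theorem contains_mk_enumerate_last (pre : List String) : ∀ (last : String) (s : Int),
    (PySem.Dict.mk (PySem.List.enumerate (pre ++ [last]) s)).contains (s + pre.length) = true := by
  induction pre with
  | nil => intro last s; simp [PySem.List.enumerate, PySem.Dict.contains_mk]
  | cons p pre ih =>
    intro last s
    simp only [List.cons_append, PySem.List.enumerate_cons, PySem.Dict.contains_mk, List.any_cons, Bool.or_eq_true]
    right
    have := ih last (s + 1)
    rw [show s + (↑(p :: pre).length : Int) = (s + 1) + (↑pre.length : Int) by simp; omega]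
    simpa [PySem.Dict.contains_mk] using this

theorem insert_mk_enumerate_last (pre : List String) (last v : String) (s : Int) :
    (PySem.Dict.mk (PySem.List.enumerate (pre ++ [last]) s)).insert (s + pre.length) v
      = PySem.Dict.mk (PySem.List.enumerate (pre ++ [v]) s) := by
  apply PySem.Dict.ext
  rw [PySem.Dict.items_insert_of_contains _ _ (contains_mk_enumerate_last pre last s)]
  exact map_replace_enumerate_last pre last v s

theorem foldB (ts : List String) :
    ((PySem.List.enumerate ts 0).foldl
      (fun (d : PySem.Dict Int String) p => d.insert p.1 p.2) PySem.Dict.empty).items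
    = PySem.List.enumerate ts 0 := by
  have h := PySem.Dict.items_foldl_insert_fresh (l := PySem.List.enumerate ts 0)
      (k := Prod.fst) (v := Prod.snd) (d := PySem.Dict.empty)
      (by intro a _; simp [PySem.Dict.empty, PySem.Dict.contains_mk])
      (by
        rw [show List.map Prod.fst (PySem.List.enumerate ts 0) = List.map (fun x => x.1) (PySem.List.enumerate ts 0) from rfl]
        rw [PySem.List.map_fst_enumerate]
        exact PySem.List.nodup_pyRange_one _ _)
  simpa [PySem.Dict.empty] using h

theorem map_ofList_addC (p : List Char) (s : List (List Char)) :
    (addC p s).map String.ofList = addS (String.ofList p) (s.map String.ofList) := by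
  cases s <;> simp [addC, addS, String.ofList_append]

theorem addS_addS (p q : String) (s : List String) :
    addS (p ++ q) s = addS p (addS q s) := by
  cases s <;> simp [addS, String.append_assoc]

theorem foldA (l : List Char) : ∀ (pre : List String) (last : String),
    l.foldl
      (fun (s : PySem.Dict Int String × Int) i =>
        if i = ' ' then (s.1.insert (s.2 + 1) "", s.2 + 1)
        else (s.1.insert s.2 (s.1.getD s.2 "" ++ String.ofList [i]), s.2))
      (PySem.Dict.mk (PySem.List.enumerate (pre ++ [last]) 0), (pre.length : Int))
    = (PySem.Dict.mk (PySem.List.enumerate (pre ++ addS last ((mySplit l).map String.ofList)) 0),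
       (pre.length : Int) + (mySplit l).length - 1) := by
  induction l with
  | nil =>
    intro pre last
    simp [mySplit, addS]
  | cons c rest ih =>
    intro pre last
    rw [List.foldl_cons]
    by_cases hc : c = ' '
    · subst hc
      simp only [if_pos rfl]
      have hkey : (pre.length : Int) + 1 = (0 : Int) + ((pre ++ [last]).length : Int) := by
        simp
      rw [hkey, insert_mk_enumerate_fresh]
      have := ih (pre ++ [last]) ""
      rw [show ((pre ++ [last]).length : Int) = ((pre.length : Int) + 1) by simp] at this ⊢
      rw [show (0:Int) + ((pre.length : Int) + 1) = (pre.length:Int) + 1 by omega]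
      simp only [if_true]
      rw [this]
      have hlist : pre ++ [last] ++ addS "" ((mySplit rest).map String.ofList)
          = pre ++ addS last ((mySplit (' ' :: rest)).map String.ofList) := by
        simp only [mySplit, if_pos rfl, List.map_cons]
        cases hm : mySplit rest with
        | nil => exact absurd hm (mySplit_ne_nil rest)
        | cons x r => simp [addS]
      have hcount : (pre.length : Int) + 1 + ((mySplit rest).length : Int) - 1
          = (pre.length : Int) + ((mySplit (' ' :: rest)).length : Int) - 1 := by
        simp only [mySplit, if_pos rfl]
        push_cast [List.length_cons]
        ring
      rw [hlist, hcount]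
    · simp only [if_neg hc]
      have hg : (PySem.Dict.mk (PySem.List.enumerate (pre ++ [last]) 0)).getD ((pre.length : Int)) ""
          = last := by
        have := getD_mk_enumerate_last pre last 0
        rwa [show (0:Int) + (pre.length : Int) = (pre.length : Int) by omega] at this
      have hins : (PySem.Dict.mk (PySem.List.enumerate (pre ++ [last]) 0)).insert ((pre.length : Int))
            (last ++ String.ofList [c])
          = PySem.Dict.mk (PySem.List.enumerate (pre ++ [last ++ String.ofList [c]]) 0) := by
        have := insert_mk_enumerate_last pre last (last ++ String.ofList [c]) 0
        rwa [show (0:Int) + (pre.length : Int) = (pre.length : Int) by omega] at this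
      rw [hg, hins, ih pre (last ++ String.ofList [c])]
      have hlist : pre ++ addS (last ++ String.ofList [c]) ((mySplit rest).map String.ofList)
          = pre ++ addS last ((mySplit (c :: rest)).map String.ofList) := by
        simp only [mySplit, if_neg hc]
        rw [map_ofList_addC, ← addS_addS]
      have hcount : (pre.length : Int) + ((mySplit rest).length : Int) - 1
          = (pre.length : Int) + ((mySplit (c :: rest)).length : Int) - 1 := by
        simp only [mySplit, if_neg hc]
        cases hm : mySplit rest with
        | nil => exact absurd hm (mySplit_ne_nil rest)
        | cons x r => simp [addC]
      rw [hlist, hcount]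

theorem foldA' (a : String) :
    str_to_dic a
    = (PySem.Dict.mk (PySem.List.enumerate (addS "" ((mySplit a.toList).map String.ofList)) 0)).items := by
  unfold str_to_dic
  have h0 : (PySem.Dict.empty.insert (0:Int) "" : PySem.Dict Int String)
      = PySem.Dict.mk (PySem.List.enumerate (([] : List String) ++ [""]) 0) := by
    apply PySem.Dict.ext
    rw [PySem.Dict.items_insert_of_not_contains _ _ (show (PySem.Dict.empty : PySem.Dict Int String).contains 0 = false by simp [PySem.Dict.empty, PySem.Dict.contains_mk])]
    simp [PySem.Dict.empty, PySem.List.enumerate]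
  rw [show ((PySem.Dict.empty.insert (0:Int) "" : PySem.Dict Int String), (0:Int)) = (PySem.Dict.mk (PySem.List.enumerate (([] : List String) ++ [""]) 0), ((([]:List String)).length : Int)) by rw [h0]; rfl]
  rw [foldA]
  simp

-- ===== VERDICT (by name: the statement is the Claim_ definition above) =====
theorem str_to_dic_spec : Claim_equal_str_to_dic := by
  intro a _
  unfold Spec_str_to_dic str_to_dic_alt
  rw [foldB, splitOn_eq_mySplit, foldA']
  cases h : mySplit a.toList with
  | nil => exact absurd h (mySplit_ne_nil _)
  | cons x r => simp [addS]
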